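-- pv_equiv track=rewrite | github.com/und3rr00t/A-Maz-Ing | turt/a_maze_ing.py | get_path_coords
-- ===== SOURCE A (Python) =====
-- from typing import List, Tuple, Dict, Any
--
-- def get_path_coords(start: Tuple[int, int], path_str: str) -> List[Tuple[int, int]]:
--     coords = [start]
--     x, y = start
--     for move in path_str:
--         if move == 'N': y -= 1
--         elif move == 'S': y += 1
--         elif move == 'E': x += 1
--         elif move == 'W': x -= 1
--         coords.append((x, y))
--     return coords
-- ===== SOURCE B (Python) =====
-- def get_path_coords(start, path_str):
--     x0, y0 = start
--     n = len(path_str)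
--     return [(x0 + path_str.count('E', 0, i) - path_str.count('W', 0, i),
--              y0 + path_str.count('S', 0, i) - path_str.count('N', 0, i))
--             for i in range(n + 1)]
-- ===== Notes on version B (the rewrite author's own statement) =====
-- stated objective: alternative
-- what changed: Replaces the running-state loop by a stateless closed form: the i-th coordinate is computed directly as start plus the net E/W and S/N character counts of the length-i prefix, one count-based formula per index instead of a fused state update.
import Mathlib
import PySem

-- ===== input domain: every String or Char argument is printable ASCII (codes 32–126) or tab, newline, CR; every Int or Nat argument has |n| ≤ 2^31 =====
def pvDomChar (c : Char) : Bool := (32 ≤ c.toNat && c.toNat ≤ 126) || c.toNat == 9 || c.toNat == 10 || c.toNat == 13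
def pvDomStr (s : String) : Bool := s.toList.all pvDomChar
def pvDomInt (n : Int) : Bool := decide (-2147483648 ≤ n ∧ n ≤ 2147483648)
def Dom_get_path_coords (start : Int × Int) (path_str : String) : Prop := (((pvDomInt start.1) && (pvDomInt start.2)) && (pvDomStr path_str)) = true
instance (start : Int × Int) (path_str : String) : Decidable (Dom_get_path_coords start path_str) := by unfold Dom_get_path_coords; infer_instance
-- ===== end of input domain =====

-- B replaces A's fused state-update loop by a stateless closed form: coordinate i = start + net prefix counts of E/W and S/N; objective: alternative (B is quadratic, not faster).


-- ===== PORT A =====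
-- literal transliteration: one loop over the characters updating (coords, x, y)
def get_path_coords (start : Int × Int) (path_str : String) : List (Int × Int) :=
  let init : List (Int × Int) × Int × Int := ([start], start.1, start.2)
  let res := path_str.toList.foldl
    (fun (acc : List (Int × Int) × Int × Int) (move : Char) =>
      let coords := acc.1
      let x := acc.2.1
      let y := acc.2.2
      let xy : Int × Int :=
        if move = 'N' then (x, y - 1)
        else if move = 'S' then (x, y + 1)
        else if move = 'E' then (x + 1, y)
        else if move = 'W' then (x - 1, y)
        else (x, y)
      (coords ++ [xy], xy.1, xy.2)) init
  res.1

-- ===== PORT B =====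
-- path_str.count(c, 0, i) counts occurrences of the single character c in path_str[0:i];
-- ported exactly as List.count over PySem.List.slice s none (some i) (i is 0 ≤ i ≤ len here).
def get_path_coords_alt (start : Int × Int) (path_str : String) : List (Int × Int) :=
  let x0 := start.1
  let y0 := start.2
  let s := path_str.toList
  let n : Int := s.length
  (PySem.List.pyRange 0 (n + 1) 1).map (fun i =>
    let cnt : Char → Int := fun c => ((PySem.List.slice s none (some i)).count c : Int)
    (x0 + cnt 'E' - cnt 'W', y0 + cnt 'S' - cnt 'N'))

-- ===== PRECONDITION & SPEC =====
def Spec_get_path_coords (start : Int × Int) (path_str : String) (out : List (Int × Int)) : Prop := out = get_path_coords_alt start path_str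
instance (start : Int × Int) (path_str : String) (out : List (Int × Int)) : Decidable (Spec_get_path_coords start path_str out) := by unfold Spec_get_path_coords; infer_instance

-- ===== CLAIM =====
def Claim_equal_get_path_coords : Prop := ∀ (start : Int × Int) (path_str : String), Dom_get_path_coords start path_str → Spec_get_path_coords start path_str (get_path_coords start path_str)

-- ===== LEMMAS AND PROOFS =====

-- position after consuming prefix t: start plus net counts
def pvPos (start : Int × Int) (t : List Char) : Int × Int :=
  (start.1 + (t.count 'E' : Int) - (t.count 'W' : Int),
   start.2 + (t.count 'S' : Int) - (t.count 'N' : Int))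

theorem pvPos_append_singleton (start : Int × Int) (t : List Char) (m : Char) :
    pvPos start (t ++ [m]) =
      (if m = 'N' then ((pvPos start t).1, (pvPos start t).2 - 1)
       else if m = 'S' then ((pvPos start t).1, (pvPos start t).2 + 1)
       else if m = 'E' then ((pvPos start t).1 + 1, (pvPos start t).2)
       else if m = 'W' then ((pvPos start t).1 - 1, (pvPos start t).2)
       else ((pvPos start t).1, (pvPos start t).2)) := by
  by_cases h1 : m = 'N'
  · subst h1; refine Prod.ext ?_ ?_ <;> simp [pvPos, List.count_append] <;> omega
  by_cases h2 : m = 'S'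
  · subst h2; refine Prod.ext ?_ ?_ <;> simp [pvPos, List.count_append] <;> omega
  by_cases h3 : m = 'E'
  · subst h3; refine Prod.ext ?_ ?_ <;> simp [pvPos, List.count_append] <;> omega
  by_cases h4 : m = 'W'
  · subst h4; refine Prod.ext ?_ ?_ <;> simp [pvPos, List.count_append] <;> omega
  · simp [pvPos, List.count_append, h1, h2, h3, h4]

-- A's loop state after consuming l: the full coordinate list so far and pvPos of l
theorem pvA_char (start : Int × Int) (l : List Char) :
    l.foldl
      (fun (acc : List (Int × Int) × Int × Int) (move : Char) =>
        let coords := acc.1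
        let x := acc.2.1
        let y := acc.2.2
        let xy : Int × Int :=
          if move = 'N' then (x, y - 1)
          else if move = 'S' then (x, y + 1)
          else if move = 'E' then (x + 1, y)
          else if move = 'W' then (x - 1, y)
          else (x, y)
        (coords ++ [xy], xy.1, xy.2)) ([start], start.1, start.2)
    = ((List.range (l.length + 1)).map (fun i => pvPos start (l.take i)),
       (pvPos start l).1, (pvPos start l).2) := by
  induction l using List.reverseRecOn with
  | nil => simp [pvPos]
  | append_singleton t m ih =>
    rw [List.foldl_append, ih]
    simp only [List.foldl_cons, List.foldl_nil]
    have hxy : (if m = 'N' then (((pvPos start t).1, (pvPos start t).2 - 1) : Int × Int)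
        else if m = 'S' then ((pvPos start t).1, (pvPos start t).2 + 1)
        else if m = 'E' then ((pvPos start t).1 + 1, (pvPos start t).2)
        else if m = 'W' then ((pvPos start t).1 - 1, (pvPos start t).2)
        else ((pvPos start t).1, (pvPos start t).2)) = pvPos start (t ++ [m]) :=
      (pvPos_append_singleton start t m).symm
    rw [hxy]
    have hmap : (List.range (t.length + 1)).map (fun i => pvPos start (t.take i))
        ++ [pvPos start (t ++ [m])]
        = (List.range ((t ++ [m]).length + 1)).map (fun i => pvPos start ((t ++ [m]).take i)) := by
      conv_rhs => rw [show (t ++ [m]).length + 1 = (t.length + 1) + 1 from by simp,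
        List.range_succ, List.map_append]
      congr 1
      · apply List.map_congr_left
        intro i hi
        have hi' : i ≤ t.length := by
          have := List.mem_range.mp hi; omega
        rw [List.take_append_of_le_length hi']
      · simp [List.take_of_length_le (by simp : (t ++ [m]).length ≤ t.length + 1)]
    exact Prod.ext hmap rfl

-- B's map over the range computes the same prefix-position list
theorem pvB_char (start : Int × Int) (s : List Char) :
    (PySem.List.pyRange 0 ((s.length : Int) + 1) 1).map (fun i =>
      let cnt : Char → Int := fun c => ((PySem.List.slice s none (some i)).count c : Int)
      ((start.1 + cnt 'E' - cnt 'W', start.2 + cnt 'S' - cnt 'N') : Int × Int))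
    = (List.range (s.length + 1)).map (fun i => pvPos start (s.take i)) := by
  rw [PySem.List.pyRange_one]
  have htn : (((s.length : Int) + 1 - 0)).toNat = s.length + 1 := by omega
  rw [htn, List.map_map]
  apply List.map_congr_left
  intro i _
  simp only [Function.comp]
  have hz : ((0 : Int) + (i : Int)) = ((i : Nat) : Int) := by omega
  rw [hz, PySem.List.slice_to_natCast]
  simp [pvPos]

-- ===== VERDICT =====
theorem get_path_coords_spec : Claim_equal_get_path_coords := by
  intro start path_str _
  unfold Spec_get_path_coords get_path_coords get_path_coords_alt
  simp only []
  rw [pvA_char, pvB_char]
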